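-- pv_equiv track=rewrite | github.com/nthhcmus/DataStructure-Algorithms | Number_Theory/041 So gan thuan nghich.py | check
-- ===== SOURCE A (Python) =====
-- def check(n):
--     last = n % 10
--     n //= 10
--     temp = n
--     digit = 0
--     rev = 0
--     cnt = 0
--
--     while temp > 0:
--         digit = temp % 10
--         temp //= 10
--         rev = rev*10 + digit
--         cnt += 1
--     cnt-= 1
--     rev //= 10
--     return n - rev == digit*10**cnt and (last == digit*2 or digit == last*2)
-- ===== SOURCE B (Python) =====
-- def _val(ds):
--     v = 0
--     for x in ds:
--         v = v * 10 + x
--     return v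
--
--
-- def check(n):
--     if n < 10:
--         return n == 0
--     last = n % 10
--     m = n // 10
--     ds = []
--     while m > 0:
--         ds.append(m % 10)
--         m //= 10
--     d = ds[-1]
--     rest = ds[:-1]
--     return _val(rest) == _val(rest[::-1]) and (last == d * 2 or d == last * 2)
-- ===== Notes on version B (the rewrite author's own statement) =====
-- stated objective: alternative
-- what changed: B builds the explicit little-endian digit list of n//10, drops its leading digit, and compares the positional value of the rest against the value of the reversed list, instead of A's single fused loop that maintains a running numeric reversal, a digit counter and a 10**cnt power comparison.
import Mathlib
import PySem

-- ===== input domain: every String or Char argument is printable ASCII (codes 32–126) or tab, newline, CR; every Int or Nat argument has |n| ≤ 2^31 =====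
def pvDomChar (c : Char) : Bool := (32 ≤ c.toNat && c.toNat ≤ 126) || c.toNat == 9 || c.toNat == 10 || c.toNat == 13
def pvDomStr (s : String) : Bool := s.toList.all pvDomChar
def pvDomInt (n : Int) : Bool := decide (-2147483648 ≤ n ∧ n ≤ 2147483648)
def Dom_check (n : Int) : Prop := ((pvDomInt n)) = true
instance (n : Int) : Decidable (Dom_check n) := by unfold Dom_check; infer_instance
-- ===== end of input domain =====

-- B re-states the check on an explicit digit list (value of the rest vs value of its reverse)
-- instead of A's fused running-reversal/counter/power loop: an alternative decomposition, not faster.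

-- termination helper for both digit loops: n // 10 strictly shrinks a positive n
theorem pvFloordiv10_lt (t : Int) (h : 0 < t) :
    (PySem.Int.floordiv t 10).toNat < t.toNat := by
  have h1 : PySem.Int.floordiv t 10 < t := by
    rw [PySem.Int.floordiv_lt_iff_lt_mul (by omega)]
    omega
  have h2 : 0 ≤ PySem.Int.floordiv t 10 := by
    rw [PySem.Int.le_floordiv_iff_mul_le (by omega)]
    omega
  omega

-- ===== PORT A =====
-- the while loop: state (temp, digit, rev, cnt); returns the final (digit, rev, cnt)
def checkLoop (temp digit rev cnt : Int) : Int × Int × Int :=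
  if h : 0 < temp then
    checkLoop (PySem.Int.floordiv temp 10) (PySem.Int.mod temp 10)
      (rev * 10 + PySem.Int.mod temp 10) (cnt + 1)
  else (digit, rev, cnt)
termination_by temp.toNat
decreasing_by exact pvFloordiv10_lt temp h

def check (n : Int) : Bool :=
  let last := PySem.Int.mod n 10
  let n2 := PySem.Int.floordiv n 10
  let r := checkLoop n2 0 0 0
  let digit := r.1
  let rev0 := r.2.1
  let cnt := r.2.2 - 1
  let rev := PySem.Int.floordiv rev0 10
  -- digit*10**cnt: cnt = -1 exactly when the loop never ran, and then digit = 0, so Python's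
  -- digit*10**cnt is the float 0.0 and 'n - rev == 0.0' is exactly the Int test n2 - rev = 0.
  (if 0 ≤ cnt then decide (n2 - rev = digit * 10 ^ cnt.toNat) else decide (n2 - rev = 0)) &&
    (decide (last = digit * 2) || decide (digit = last * 2))

-- ===== PORT B =====
-- _val: v = 0; for x in ds: v = v*10 + x
def pvVal (ds : List Int) : Int := ds.foldl (fun v x => v * 10 + x) 0

-- the digit-collecting while loop: ds.append(m % 10); m //= 10
def checkAltLoop (m : Int) (ds : List Int) : List Int :=
  if h : 0 < m then
    checkAltLoop (PySem.Int.floordiv m 10) (ds ++ [PySem.Int.mod m 10])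
  else ds
termination_by m.toNat
decreasing_by exact pvFloordiv10_lt m h

def check_alt (n : Int) : Bool :=
  if n < 10 then decide (n = 0)
  else
    let last := PySem.Int.mod n 10
    let m := PySem.Int.floordiv n 10
    let ds := checkAltLoop m []
    let d := PySem.List.pyGetD ds (-1) 0          -- ds[-1]; ds ≠ [] since m ≥ 1
    let rest := PySem.List.slice ds none (some (-1))   -- ds[:-1]
    -- rest[::-1]: slice? with step -1 only fails for step 0, so getD [] is exact
    decide (pvVal rest = pvVal ((PySem.List.slice? rest none none (-1)).getD [])) &&
      (decide (last = d * 2) || decide (d = last * 2))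

-- ===== PRECONDITION & SPEC =====
def Spec_check (n : Int) (out : Bool) : Prop := out = check_alt n
instance (n : Int) (out : Bool) : Decidable (Spec_check n out) := by unfold Spec_check; infer_instance

-- ===== CLAIM (what is proved, stated in full; the proofs are below) =====
def Claim_equal_check : Prop := ∀ (n : Int), Dom_check n → Spec_check n (check n)

-- ===== LEMMAS AND PROOFS =====

theorem checkAltLoop_acc (m : Int) : ∀ ds, checkAltLoop m ds = ds ++ checkAltLoop m [] := by
  generalize hk : m.toNat = k
  induction k using Nat.strong_induction_on generalizing m with
  | _ k ih =>
    intro ds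
    conv_lhs => rw [checkAltLoop]
    conv_rhs => rw [checkAltLoop]
    by_cases h : 0 < m
    · simp only [h, dif_pos]
      have e1 := ih _ (hk ▸ pvFloordiv10_lt m h) _ rfl
      rw [e1 (ds ++ [PySem.Int.mod m 10]), e1 ([] ++ [PySem.Int.mod m 10])]
      simp
    · simp [h]

theorem checkAltLoop_ne_nil (m : Int) (h : 0 < m) : checkAltLoop m [] ≠ [] := by
  rw [checkAltLoop]
  simp only [h, dif_pos]
  rw [checkAltLoop_acc]
  simp

theorem checkAltLoop_digits (m : Int) : ∀ x ∈ checkAltLoop m [], 0 ≤ x ∧ x < 10 := by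
  generalize hk : m.toNat = k
  induction k using Nat.strong_induction_on generalizing m with
  | _ k ih =>
    intro x hx
    rw [checkAltLoop] at hx
    by_cases h : 0 < m
    · simp only [h, dif_pos] at hx
      rw [checkAltLoop_acc] at hx
      rcases List.mem_append.1 hx with h1 | h2
      · simp only [List.nil_append, List.mem_singleton] at h1
        subst h1
        exact ⟨PySem.Int.mod_nonneg _ (by omega), PySem.Int.mod_lt _ (by omega)⟩
      · exact ih _ (hk ▸ pvFloordiv10_lt m h) _ rfl _ h2
    · simp [h] at hx

-- A's loop, expressed through B's digit list: last digit, big-endian value, digit count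
theorem checkLoop_eq (m : Int) (h : 0 < m) : ∀ dg rv c,
    checkLoop m dg rv c =
      ((checkAltLoop m []).getLastD 0,
       (checkAltLoop m []).foldl (fun v x => v * 10 + x) rv,
       c + (checkAltLoop m []).length) := by
  generalize hk : m.toNat = k
  induction k using Nat.strong_induction_on generalizing m with
  | _ k ih =>
    intro dg rv c
    rw [checkLoop, checkAltLoop]
    simp only [h, dif_pos]
    by_cases h2 : 0 < PySem.Int.floordiv m 10
    · rw [ih _ (hk ▸ pvFloordiv10_lt m h) _ h2 rfl]
      rw [checkAltLoop_acc _ ([] ++ [PySem.Int.mod m 10])]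
      have hne := checkAltLoop_ne_nil _ h2
      simp only [List.nil_append, List.singleton_append, Prod.mk.injEq, List.foldl_cons,
        List.length_cons]
      refine ⟨?_, trivial, by omega⟩
      cases hc : checkAltLoop (PySem.Int.floordiv m 10) [] with
      | nil => exact absurd hc hne
      | cons a t => simp
    · rw [checkLoop]
      have h3 : 0 ≤ PySem.Int.floordiv m 10 := by
        rw [PySem.Int.le_floordiv_iff_mul_le (by omega)]; omega
      have h4 : PySem.Int.floordiv m 10 = 0 := by omega
      rw [checkAltLoop_acc, checkAltLoop, h4]
      simp

theorem foldl_val_nonneg (l : List Int) (hl : ∀ x ∈ l, 0 ≤ x) :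
    ∀ v : Int, 0 ≤ v → 0 ≤ l.foldl (fun v x => v * 10 + x) v := by
  induction l with
  | nil => intro v hv; simpa using hv
  | cons a t ih =>
    intro v hv
    simp only [List.foldl_cons]
    have ha := hl a (by simp)
    exact ih (fun x hx => hl x (by simp [hx])) _ (by omega)

-- value of a little-endian digit list
def pvValLE (l : List Int) : Int := l.reverse.foldl (fun v x => v * 10 + x) 0

theorem foldl_val_append (l : List Int) (x v : Int) :
    (l ++ [x]).foldl (fun v x => v * 10 + x) v = (l.foldl (fun v x => v * 10 + x) v) * 10 + x := by
  simp

theorem pvValLE_cons (d : Int) (t : List Int) : pvValLE (d :: t) = d + 10 * pvValLE t := by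
  unfold pvValLE
  simp only [List.reverse_cons, foldl_val_append]
  ring

theorem pvValLE_append_singleton (l : List Int) (x : Int) :
    pvValLE (l ++ [x]) = pvValLE l + x * 10 ^ l.length := by
  induction l with
  | nil => simp [pvValLE]
  | cons a t ih =>
    simp only [List.cons_append, pvValLE_cons, ih, List.length_cons]
    ring

-- the digit list really decomposes m
theorem checkAltLoop_val (m : Int) (h : 0 ≤ m) : pvValLE (checkAltLoop m []) = m := by
  generalize hk : m.toNat = k
  induction k using Nat.strong_induction_on generalizing m with
  | _ k ih =>
    rw [checkAltLoop]
    by_cases h1 : 0 < m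
    · simp only [h1, dif_pos]
      rw [checkAltLoop_acc]
      have h2 : 0 ≤ PySem.Int.floordiv m 10 := by
        rw [PySem.Int.le_floordiv_iff_mul_le (by omega)]; omega
      simp only [List.nil_append, List.singleton_append, pvValLE_cons]
      rw [ih _ (hk ▸ pvFloordiv10_lt m h1) _ h2 rfl]
      have := PySem.Int.floordiv_mul_add_mod m 10
      omega
    · have h2 : m = 0 := by omega
      simp [h2, pvValLE]

-- ===== VERDICT (by name: the statement is the Claim_ definition above) =====
theorem check_spec : Claim_equal_check := by
  unfold Claim_equal_check Spec_check
  intro n _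
  by_cases hn : n < 10
  · -- n < 10: A's loop never runs (n // 10 ≤ 0) and A reduces to the test n = 0, as does B
    have hf1 : PySem.Int.floordiv n 10 < 1 := by
      rw [PySem.Int.floordiv_lt_iff_lt_mul (by omega)]; omega
    have hnp : ¬ 0 < PySem.Int.floordiv n 10 := by omega
    have h0 : checkLoop (PySem.Int.floordiv n 10) 0 0 0 = (0, 0, 0) := by
      rw [checkLoop, dif_neg hnp]
    simp only [check, check_alt, h0, if_pos hn]
    norm_num
    by_cases hz : n = 0
    · simp [hz]
    · by_cases hpos : 0 ≤ n
      · have h10 : ¬ (10 ∣ n) := by omega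
        simp [h10, hz]
      · have hq : n / 10 ≠ 0 := by omega
        simp [hq, hz]
  · -- n ≥ 10: both sides reduce to the digit list of m = n // 10
    have hm : 0 < PySem.Int.floordiv n 10 := by
      have h1 : (1:Int) ≤ PySem.Int.floordiv n 10 := by
        rw [PySem.Int.le_floordiv_iff_mul_le (by omega)]; omega
      omega
    have hne : checkAltLoop (PySem.Int.floordiv n 10) [] ≠ [] := checkAltLoop_ne_nil _ hm
    obtain ⟨es, dl, hsplit⟩ : ∃ es dl,
        checkAltLoop (PySem.Int.floordiv n 10) [] = es ++ [dl] :=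
      ⟨_, _, (List.dropLast_append_getLast hne).symm⟩
    have hdig : ∀ x ∈ es ++ [dl], 0 ≤ x ∧ x < 10 := hsplit ▸ checkAltLoop_digits _
    have hdl10 : 0 ≤ dl ∧ dl < 10 := hdig dl (by simp)
    have hE : 0 ≤ es.foldl (fun v x => v * 10 + x) 0 :=
      foldl_val_nonneg es (fun x hx => (hdig x (List.mem_append_left _ hx)).1) 0 le_rfl
    have hA := checkLoop_eq (PySem.Int.floordiv n 10) hm 0 0 0
    rw [hsplit] at hA
    have hval : pvValLE es + dl * 10 ^ es.length = PySem.Int.floordiv n 10 := by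
      rw [← pvValLE_append_singleton, ← hsplit]
      exact checkAltLoop_val _ (by omega)
    simp only [check, check_alt, hA, hsplit, if_neg hn]
    have hlast : (es ++ [dl]).getLastD 0 = dl := by simp
    have hfold : (es ++ [dl]).foldl (fun v x => v * 10 + x) 0
        = (es.foldl (fun v x => v * 10 + x) 0) * 10 + dl := foldl_val_append es dl 0
    have hlen : ((es ++ [dl]).length : Int) = (es.length : Int) + 1 := by simp
    rw [hlast, hfold, hlen]
    have hrev : PySem.Int.floordiv ((es.foldl (fun v x => v * 10 + x) 0) * 10 + dl) 10
        = es.foldl (fun v x => v * 10 + x) 0 := by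
      rw [PySem.Int.floordiv_eq_iff_of_pos (by omega)]
      constructor <;> nlinarith [hdl10.1, hdl10.2]
    rw [hrev]
    have hgd : PySem.List.pyGetD (es ++ [dl]) (-1) 0 = dl :=
      PySem.List.pyGetD_neg_one_append_singleton es dl 0
    have hslice : PySem.List.slice (es ++ [dl]) none (some (-1)) = es := by
      rw [PySem.List.slice_to_neg_one]; simp
    rw [hgd, hslice, PySem.List.slice?_none_none_neg_one]
    have hcnt : (0 + ((es.length : Int) + 1)) - 1 = (es.length : Int) := by omega
    rw [hcnt, if_pos (by positivity : (0:Int) ≤ (es.length : Int))]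
    have hc1 : decide (PySem.Int.floordiv n 10 - es.foldl (fun v x => v * 10 + x) 0
          = dl * 10 ^ ((es.length : Int)).toNat)
        = decide (pvVal es = pvVal ((some es.reverse).getD [])) := by
      have h1 : pvVal ((some es.reverse).getD []) = pvValLE es := rfl
      have h2 : pvVal es = es.foldl (fun v x => v * 10 + x) 0 := rfl
      rw [h1, h2]
      have h3 : ((es.length : Int)).toNat = es.length := by omega
      rw [h3]
      apply decide_eq_decide.2
      constructor
      · intro h; nlinarith [hval]
      · intro h; nlinarith [hval]
    rw [hc1]
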